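-- pv_equiv track=rewrite | github.com/steven-martins/GoogleCodeJam2016 | Qualification Round/codejam_2.py | sub_calc_plus2
-- ===== SOURCE A (Python) =====
-- def reverse(str, pos):
--     if pos == 0:
--         return str
--     top = str[0:pos]
--     bottom = str[pos:]
--     str = ""
--     for i in range(len(top)):
--         str += "+" if top[i] == "-" else "-"
--     top = str[::-1]
--     return top + bottom
--
-- def count_plus(str):
--     i = 0
--     for c in str:
--         if c == "+":
--             i += 1
--     return i
--
-- def sub_calc_plus2(val, lastp):
--     max_plus = 0
--     max_i = 0
--     for i in range(lastp + 1): # ou just lastp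
--         s = count_plus(reverse(val, i))
--         if s > max_plus:
--             max_plus = s
--             max_i = i
--     return reverse(val, max_i)
-- ===== SOURCE B (Python) =====
-- def sub_calc_plus2(val, lastp):
--     # One pass with running prefix counters instead of re-scanning the string
--     # for every candidate flip position; then build the result directly.
--     if lastp < 0:
--         return val
--     n = len(val)
--     m = min(lastp, n)
--     best_s, best_i = 0, 0
--     minus, plus = 0, val.count('+')
--     for i in range(m + 1):
--         s = minus + plus
--         if s > best_s:
--             best_s, best_i = s, i
--         if i < n:
--             if val[i] == '-':
--                 minus += 1
--             elif val[i] == '+':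
--                 plus -= 1
--     return ''.join('+' if c == '-' else '-' for c in reversed(val[:best_i])) + val[best_i:]
-- ===== Notes on version B (the rewrite author's own statement) =====
-- stated objective: faster
-- what changed: Replaces the O(n*lastp) loop that rebuilds and rescans the flipped string for every candidate position with a single pass maintaining running '-'/'+' prefix counters (each flip's plus-count in O(1)), then builds the flipped result once.
import Mathlib
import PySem

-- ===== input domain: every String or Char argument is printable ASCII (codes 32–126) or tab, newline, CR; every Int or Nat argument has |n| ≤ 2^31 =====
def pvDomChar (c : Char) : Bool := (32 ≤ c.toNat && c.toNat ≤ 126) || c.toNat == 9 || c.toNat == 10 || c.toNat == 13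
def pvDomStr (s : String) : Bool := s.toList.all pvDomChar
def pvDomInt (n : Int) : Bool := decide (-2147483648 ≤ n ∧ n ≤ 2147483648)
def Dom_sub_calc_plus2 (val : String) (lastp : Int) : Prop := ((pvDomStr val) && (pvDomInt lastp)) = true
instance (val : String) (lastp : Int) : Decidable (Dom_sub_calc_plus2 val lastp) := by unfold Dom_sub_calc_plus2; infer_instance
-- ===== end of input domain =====

-- B replaces A's O(n·lastp) rescan-per-position loop by one pass with running '-'/'+'
-- prefix counters, then builds the flipped result once (faster; same return value).

-- ===== PORT A =====
-- helper `count_plus` of A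
def pvCountPlus (s : List Char) : Int :=
  s.foldl (fun i c => if c == '+' then i + 1 else i) 0

-- helper `reverse` of A; `str[::-1]` is List.reverse (PySem.List.slice?_none_none_neg_one)
def pvReverse (s : List Char) (pos : Int) : List Char :=
  if pos = 0 then s
  else
    let top := PySem.List.slice s (some 0) (some pos)
    let bottom := PySem.List.slice s (some pos) none
    let str := (PySem.List.pyRange 0 (top.length : Int) 1).foldl
      (fun acc i => acc ++ [if PySem.List.pyGetD top i ' ' == '-' then '+' else '-']) []
    str.reverse ++ bottom

def sub_calc_plus2 (val : String) (lastp : Int) : String :=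
  let r := (PySem.List.pyRange 0 (lastp + 1) 1).foldl
      (fun (st : Int × Int) i =>
        let s := pvCountPlus (pvReverse val.toList i)
        if s > st.1 then (s, i) else st) ((0 : Int), (0 : Int))
  String.ofList (pvReverse val.toList r.2)

-- ===== PORT B =====
-- loop body of Source B: state (best_s, best_i, minus, plus), one iteration at index i
def pvStepB (l : List Char) (n : Int) (st : Int × Int × Int × Int) (i : Int) :
    Int × Int × Int × Int :=
  let s := st.2.2.1 + st.2.2.2
  let st := if s > st.1 then (s, i, st.2.2.1, st.2.2.2) else st
  if i < n then
    let c := PySem.List.pyGetD l i ' '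
    if c == '-' then (st.1, st.2.1, st.2.2.1 + 1, st.2.2.2)
    else if c == '+' then (st.1, st.2.1, st.2.2.1, st.2.2.2 - 1)
    else st
  else st

def sub_calc_plus2_alt (val : String) (lastp : Int) : String :=
  if lastp < 0 then val
  else
    let l := val.toList
    let n : Int := (l.length : Int)
    let m := min lastp n
    let st := (PySem.List.pyRange 0 (m + 1) 1).foldl (pvStepB l n)
        (0, 0, 0, (l.map (fun c => if c == '+' then (1 : Int) else 0)).sum)
    let k := st.2.1
    String.ofList (((PySem.List.slice l none (some k)).reverse.map
        (fun c => if c == '-' then '+' else '-')) ++ PySem.List.slice l (some k) none)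

-- ===== PRECONDITION & SPEC =====
def Spec_sub_calc_plus2 (val : String) (lastp : Int) (out : String) : Prop := out = sub_calc_plus2_alt val lastp
instance (val : String) (lastp : Int) (out : String) : Decidable (Spec_sub_calc_plus2 val lastp out) := by unfold Spec_sub_calc_plus2; infer_instance

-- ===== CLAIM (what is proved, stated in full; the proofs are below) =====
def Claim_equal_sub_calc_plus2 : Prop := ∀ (val : String) (lastp : Int), Dom_sub_calc_plus2 val lastp → Spec_sub_calc_plus2 val lastp (sub_calc_plus2 val lastp)

-- ===== LEMMAS AND PROOFS =====

-- the character flip both programs apply to the prefix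
def pvFlip (c : Char) : Char := if c == '-' then '+' else '-'

-- plus-count of the string after flipping-and-reversing the first i characters
def pvScore (l : List Char) (i : Int) : Int :=
  ((l.take i.toNat).count '-' : Int) + ((l.drop i.toNat).count '+' : Int)

-- A's "first strict argmax" fold, abstracted over the scoring function
def pvBest (f : Int → Int) (xs : List Int) (st : Int × Int) : Int × Int :=
  xs.foldl (fun st i => if f i > st.1 then (f i, i) else st) st

theorem pvCountPlus_eq (l : List Char) : pvCountPlus l = (l.count '+' : Int) := by
  simpa [pvCountPlus] using PySem.List.foldl_beq_add_one l '+' 0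

theorem pvFlip_beq (c : Char) : (pvFlip c == '+') = (c == '-') := by
  by_cases h : c = '-' <;> simp [pvFlip, h]

theorem pvReverse_eq (l : List Char) (i : Int) (h : 0 ≤ i) :
    pvReverse l i = ((l.take i.toNat).map pvFlip).reverse ++ l.drop i.toNat := by
  by_cases h0 : i = 0
  · subst h0; simp [pvReverse]
  · simp only [pvReverse, if_neg h0, PySem.List.slice_zero_start]
    rw [PySem.List.slice_to _ h, PySem.List.slice_from _ h,
      PySem.List.foldl_append_singleton_eq_map]
    simp only [List.nil_append]
    congr 1
    congr 1
    have hmap := congrArg (List.map pvFlip) (PySem.List.map_pyGetD_pyRange_zero' (l.take i.toNat) ' ')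
    rw [List.map_map] at hmap
    refine Eq.trans (List.map_congr_left fun j _ => ?_) hmap
    simp [pvFlip, Function.comp]

theorem pvCount_map_flip (x : List Char) : (x.map pvFlip).count '+' = x.count '-' := by
  simp only [List.count_eq_countP, List.countP_map]
  exact List.countP_congr (fun c _ => by simpa using pvFlip_beq c)

theorem pvScore_spec (l : List Char) (i : Int) (h : 0 ≤ i) :
    pvCountPlus (pvReverse l i) = pvScore l i := by
  rw [pvReverse_eq l i h, pvCountPlus_eq, pvScore]
  simp only [List.count_append, List.count_reverse, pvCount_map_flip]
  push_cast
  ring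

theorem pvScore_const (l : List Char) (i : Int) (h : (l.length : Int) ≤ i) :
    pvScore l i = pvScore l (l.length : Int) := by
  have h1 : l.length ≤ i.toNat := by omega
  simp [pvScore, List.take_of_length_le h1, List.drop_eq_nil_of_le h1]

theorem pvBest_fst_le (f : Int → Int) (xs : List Int) (st : Int × Int) :
    st.1 ≤ (pvBest f xs st).1 := by
  induction xs generalizing st with
  | nil => simp [pvBest]
  | cons x xs ih =>
    have h1 : st.1 ≤ (if f x > st.1 then (f x, x) else st).1 := by
      split_ifs with h
      · simpa using le_of_lt h
      · exact le_refl _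
    exact le_trans h1 (ih _)

theorem pvBest_le_of_mem (f : Int → Int) (xs : List Int) (st : Int × Int) (i : Int)
    (h : i ∈ xs) : f i ≤ (pvBest f xs st).1 := by
  induction xs generalizing st with
  | nil => cases h
  | cons x xs ih =>
    rcases List.mem_cons.1 h with rfl | hmem
    · have h1 : f i ≤ (if f i > st.1 then (f i, i) else st).1 := by
        split_ifs with hgt
        · exact le_refl _
        · simpa using not_lt.1 hgt
      exact le_trans h1 (pvBest_fst_le f xs _)
    · exact ih _ hmem

theorem pvBest_id (f : Int → Int) (xs : List Int) (st : Int × Int)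
    (h : ∀ i ∈ xs, f i ≤ st.1) : pvBest f xs st = st := by
  induction xs with
  | nil => rfl
  | cons x xs ih =>
    have hx : ¬ f x > st.1 := not_lt.2 (h x (List.mem_cons_self))
    show pvBest f xs (if f x > st.1 then (f x, x) else st) = st
    rw [if_neg hx]
    exact ih (fun i hi => h i (List.mem_cons_of_mem _ hi))

theorem pvBest_snd (f : Int → Int) (xs : List Int) (st : Int × Int) :
    (pvBest f xs st).2 = st.2 ∨ (pvBest f xs st).2 ∈ xs := by
  induction xs generalizing st with
  | nil => exact Or.inl rfl
  | cons x xs ih =>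
    rcases ih (if f x > st.1 then (f x, x) else st) with heq | hmem
    · by_cases hgt : f x > st.1
      · right
        show (pvBest f xs _).2 ∈ x :: xs
        rw [heq, if_pos hgt]
        exact List.mem_cons_self
      · left
        show (pvBest f xs _).2 = st.2
        rw [heq, if_neg hgt]
    · exact Or.inr (List.mem_cons_of_mem _ hmem)

-- A's loop computes pvBest of pvScore
theorem pvA_fold_eq (l : List Char) (lastp : Int) :
    (PySem.List.pyRange 0 (lastp + 1) 1).foldl
      (fun (st : Int × Int) i =>
        let s := pvCountPlus (pvReverse l i)
        if s > st.1 then (s, i) else st) ((0 : Int), (0 : Int))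
    = pvBest (pvScore l) (PySem.List.pyRange 0 (lastp + 1) 1) (0, 0) := by
  apply PySem.List.foldl_congr_mem
  intro st i hi
  have h0 : (0 : Int) ≤ i := (PySem.List.mem_pyRange_one.1 hi).1
  simp only []
  rw [pvScore_spec l i h0]

-- iterations past the string length never change the argmax
theorem pvBest_trunc (l : List Char) (lastp : Int) (_h : 0 ≤ lastp) :
    pvBest (pvScore l) (PySem.List.pyRange 0 (lastp + 1) 1) (0, 0)
    = pvBest (pvScore l) (PySem.List.pyRange 0 (min lastp (l.length : Int) + 1) 1) (0, 0) := by
  by_cases hc : lastp ≤ (l.length : Int)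
  · rw [min_eq_left hc]
  · rw [min_eq_right (by omega : (l.length : Int) ≤ lastp)]
    have hn : (0 : Int) ≤ (l.length : Int) := by positivity
    rw [PySem.List.pyRange_one_append 0 ((l.length : Int) + 1) (lastp + 1) (by omega) (by omega)]
    simp only [pvBest, List.foldl_append]
    show pvBest (pvScore l) _ (pvBest (pvScore l) _ (0, 0)) = pvBest (pvScore l) _ (0, 0)
    apply pvBest_id
    intro j hj
    have hj' := PySem.List.mem_pyRange_one.1 hj
    rw [pvScore_const l j (by omega)]
    exact pvBest_le_of_mem _ _ _ _ (PySem.List.mem_pyRange_one.2 (by omega))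

-- one step of B's loop: updates the argmax with pvScore l a and advances the counters
theorem pvStepB_spec (l : List Char) (a : Int) (st : Int × Int) (ha : 0 ≤ a) :
    pvStepB l (l.length : Int)
      (st.1, st.2, ((l.take a.toNat).count '-' : Int), ((l.drop a.toNat).count '+' : Int)) a
    = ((if pvScore l a > st.1 then (pvScore l a, a) else st).1,
       (if pvScore l a > st.1 then (pvScore l a, a) else st).2,
       ((l.take (a + 1).toNat).count '-' : Int), ((l.drop (a + 1).toNat).count '+' : Int)) := by
  have hs : ((l.take a.toNat).count '-' : Int) + ((l.drop a.toNat).count '+' : Int)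
      = pvScore l a := rfl
  by_cases hlt : a < (l.length : Int)
  · have hlen : a.toNat < l.length := by omega
    have hget : PySem.List.pyGetD l a ' ' = l[a.toNat] := by
      conv_lhs => rw [show a = ((a.toNat : Nat) : Int) by omega, PySem.List.pyGetD_natCast]
      exact List.getD_eq_getElem l ' ' hlen
    have htn : (a + 1).toNat = a.toNat + 1 := by omega
    have htake : l.take (a.toNat + 1) = l.take a.toNat ++ [l[a.toNat]] := by
      rw [List.take_add_one, List.getElem?_eq_getElem hlen]
      rfl
    have hdrop : l.drop a.toNat = l[a.toNat] :: l.drop (a.toNat + 1) :=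
      List.drop_eq_getElem_cons hlen
    simp only [pvStepB, hs, hget, if_pos hlt, htn, htake]
    by_cases hm : l[a.toNat] = '-'
    · rw [if_pos (by simpa using hm)]
      split_ifs <;> simp [hm, List.count_append, hdrop]
    · by_cases hp : l[a.toNat] = '+'
      · rw [if_neg (by simpa using hm), if_pos (by simpa using hp)]
        split_ifs <;> simp [hp, List.count_append, hdrop]
      · rw [if_neg (by simpa using hm), if_neg (by simpa using hp)]
        have hc1 : ((l.take a.toNat ++ [l[a.toNat]]).count '-' : Int)
            = ((l.take a.toNat).count '-' : Int) := by
          rw [List.count_append]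
          simp only [List.count_cons, List.count_nil, beq_iff_eq, hm, if_false]
          push_cast
          ring
        have hc2 : ((l.drop (a.toNat + 1)).count '+' : Int)
            = ((l.drop a.toNat).count '+' : Int) := by
          conv_rhs => rw [hdrop]
          simp only [List.count_cons, beq_iff_eq, hp, if_false]
          push_cast
          ring
        rw [hc1, hc2]
        split_ifs <;> rfl
  · have hlen : l.length ≤ a.toNat := by omega
    have h1 : l.take a.toNat = l.take (a + 1).toNat := by
      rw [List.take_of_length_le hlen, List.take_of_length_le (by omega)]
    have h2 : l.drop a.toNat = l.drop (a + 1).toNat := by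
      rw [List.drop_eq_nil_of_le hlen, List.drop_eq_nil_of_le (by omega)]
    simp only [pvStepB]
    rw [hs, h1, h2]
    split_ifs <;> rfl

-- B's counter loop computes the same argmax (counters are the prefix counts)
theorem pvB_fold_inv (l : List Char) (b : Int) :
    ∀ (a : Int) (st : Int × Int), 0 ≤ a →
      ∃ c d, (PySem.List.pyRange a b 1).foldl (pvStepB l (l.length : Int))
          (st.1, st.2, ((l.take a.toNat).count '-' : Int), ((l.drop a.toNat).count '+' : Int))
        = ((pvBest (pvScore l) (PySem.List.pyRange a b 1) st).1,
           (pvBest (pvScore l) (PySem.List.pyRange a b 1) st).2, c, d) := by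
  suffices H : ∀ (k : Nat) (a : Int) (st : Int × Int), (b - a).toNat = k → 0 ≤ a →
      ∃ c d, (PySem.List.pyRange a b 1).foldl (pvStepB l (l.length : Int))
          (st.1, st.2, ((l.take a.toNat).count '-' : Int), ((l.drop a.toNat).count '+' : Int))
        = ((pvBest (pvScore l) (PySem.List.pyRange a b 1) st).1,
           (pvBest (pvScore l) (PySem.List.pyRange a b 1) st).2, c, d) by
    intro a st ha
    exact H _ a st rfl ha
  intro k
  induction k with
  | zero =>
    intro a st hk _
    rw [PySem.List.pyRange_one_eq_nil (by omega : b ≤ a)]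
    exact ⟨_, _, rfl⟩
  | succ k ih =>
    intro a st hk ha
    have hab : a < b := by omega
    rw [PySem.List.pyRange_one_cons hab]
    simp only [List.foldl_cons]
    rw [pvStepB_spec l a st ha]
    obtain ⟨c, d, hcd⟩ :=
      ih (a + 1) (if pvScore l a > st.1 then (pvScore l a, a) else st) (by omega) (by omega)
    refine ⟨c, d, ?_⟩
    rw [hcd]
    show _ = ((pvBest (pvScore l) _ _).1, (pvBest (pvScore l) _ _).2, c, d)
    rfl

-- ===== VERDICT (by name: the statement is the Claim_ definition above) =====
theorem sub_calc_plus2_spec : Claim_equal_sub_calc_plus2 := by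
  intro val lastp _
  unfold Spec_sub_calc_plus2
  by_cases hneg : lastp < 0
  · have hnil : PySem.List.pyRange 0 (lastp + 1) 1 = [] :=
      PySem.List.pyRange_one_eq_nil (by omega)
    simp only [sub_calc_plus2, sub_calc_plus2_alt, hnil, if_pos hneg, List.foldl_nil]
    simp [pvReverse]
  · have h0 : (0 : Int) ≤ lastp := by omega
    simp only [sub_calc_plus2, sub_calc_plus2_alt, if_neg hneg]
    rw [pvA_fold_eq, pvBest_trunc _ _ h0]
    have hstart : ((0 : Int), (0 : Int), (0 : Int),
          (val.toList.map (fun c => if c == '+' then (1 : Int) else 0)).sum)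
        = (((0 : Int), (0 : Int)).1, ((0 : Int), (0 : Int)).2,
           ((val.toList.take ((0 : Int)).toNat).count '-' : Int),
           ((val.toList.drop ((0 : Int)).toNat).count '+' : Int)) := by
      rw [PySem.List.sum_map_ite_one_zero]
      norm_cast
    obtain ⟨c, d, hcd⟩ :=
      pvB_fold_inv val.toList (min lastp (val.toList.length : Int) + 1) 0
        ((0 : Int), (0 : Int)) le_rfl
    rw [hstart, hcd]
    have hk : 0 ≤ (pvBest (pvScore val.toList)
        (PySem.List.pyRange 0 (min lastp (val.toList.length : Int) + 1) 1)
        ((0 : Int), (0 : Int))).2 := by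
      rcases pvBest_snd (pvScore val.toList)
          (PySem.List.pyRange 0 (min lastp (val.toList.length : Int) + 1) 1)
          ((0 : Int), (0 : Int)) with he | hm
      · rw [he]
      · exact (PySem.List.mem_pyRange_one.1 hm).1
    show String.ofList (pvReverse val.toList _) = String.ofList _
    congr 1
    rw [pvReverse_eq _ _ hk, PySem.List.slice_to _ hk, PySem.List.slice_from _ hk]
    congr 1
    rw [← List.map_reverse]
    exact List.map_congr_left fun c _ => by simp [pvFlip]
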